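-- pv_equiv track=rewrite | github.com/VladislavSinkovskiy/Web_Dev_Vladislav_Sinkovskiy_221_332 | lab5/app/app.py | all_check_login
-- ===== SOURCE A (Python) =====
-- def check_login_len(login):
--     if len(login) < 5:
--         message = 'Логин должен иметь длину не менее 5 символов'
--     else:
--         message = None
--     return message
--
-- def check_login_latin(login):
--     message = None
--     latin_symb = 'abcdefghijklmnopqrstuvwxyz'
--     # Для простоты проверки удаляем из пароля все цифры и пробелы
--     login_without_numbers = ''
--     for symb in login:
--         if (symb.isdigit() == False) and (symb != ' '):
--             login_without_numbers = login_without_numbers + symb.lower()  # приводим к одному регистру для сравнения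
--     # Сам алгоритм проверки
--     for symb in login_without_numbers:
--         if not (symb in latin_symb):
--             message = 'Логин должен состоять только из латинских букв и цифр'
--             break
--         else:
--             message = None
--     return message
--
-- def all_check_login(login):
--     input_class, div_class = '', ''
--     bootstrap_class_green = {
--         'input_class': 'is-valid', 'div_class': 'valid-feedback'}
--     bootstrap_class_red = {'input_class': 'is-invalid',
--                            'div_class': 'invalid-feedback'}
--
--     message = None
--     # Выполнение всех функций по порядку
--     while message == None:
--         message = check_login_len(login)
--         break
--     while message == None:
--         message = check_login_latin(login)
--         break
--
--     # Вывод сообщения под полем ввода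
--     if message == None:
--         message = 'Логин удовлетворяет всем требованиям'
--         input_class = bootstrap_class_green['input_class']
--         div_class = bootstrap_class_green['div_class']
--     # elif, чтобы по умолчанию не подсвечивалось поле
--     elif message == '':
--         input_class = ''
--         div_class = ''
--     else:
--         input_class = bootstrap_class_red['input_class']
--         div_class = bootstrap_class_red['div_class']
--
--     return input_class, div_class, message
-- ===== SOURCE B (Python) =====
-- def all_check_login(login):
--     latin_symb = 'abcdefghijklmnopqrstuvwxyz'
--     if len(login) < 5:
--         return 'is-invalid', 'invalid-feedback', 'Логин должен иметь длину не менее 5 символов'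
--     if any(not symb.isdigit() and symb != ' ' and symb.lower() not in latin_symb
--            for symb in login):
--         return 'is-invalid', 'invalid-feedback', 'Логин должен состоять только из латинских букв и цифр'
--     return 'is-valid', 'valid-feedback', 'Логин удовлетворяет всем требованиям'
-- ===== Notes on version B (the rewrite author's own statement) =====
-- stated objective: simpler
-- what changed: B replaces A's two while-break loops, dict literals and two-pass latin check (build a filtered lowercased string, then scan it) with an early-return chain and one single pass over the login using any() with a fused predicate.
import Mathlib
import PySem

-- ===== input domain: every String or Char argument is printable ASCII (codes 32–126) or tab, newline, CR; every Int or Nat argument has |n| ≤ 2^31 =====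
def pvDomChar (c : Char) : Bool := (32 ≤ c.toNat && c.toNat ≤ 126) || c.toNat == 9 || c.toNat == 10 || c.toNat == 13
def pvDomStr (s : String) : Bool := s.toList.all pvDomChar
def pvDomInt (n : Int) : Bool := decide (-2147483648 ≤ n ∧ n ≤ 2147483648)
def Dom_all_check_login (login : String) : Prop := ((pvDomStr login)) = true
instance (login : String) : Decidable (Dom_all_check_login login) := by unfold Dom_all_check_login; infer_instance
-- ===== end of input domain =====

-- B: single early-return pass with a fused predicate instead of A's while-break loops and two-pass latin check (simpler; same cost).

-- ===== PORT A =====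
def check_login_len (login : String) : Option String :=
  if PySem.Str.len login < 5 then some "Логин должен иметь длину не менее 5 символов" else none

-- the inner scanning loop of check_login_latin (break = return some)
def latinScanA : List Char → Option String → Option String
  | [], m => m
  | c :: rest, _ =>
      if ¬ (("abcdefghijklmnopqrstuvwxyz".toList).contains c) then
        some "Логин должен состоять только из латинских букв и цифр"
      else latinScanA rest none

def check_login_latin (login : String) : Option String :=
  let login_without_numbers : List Char :=
    login.toList.foldl
      (fun acc symb =>
        if (PySem.Chars.isdigit symb = false) ∧ (symb ≠ ' ') then
          acc ++ [PySem.Chars.lowerChar symb]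
        else acc) []
  latinScanA login_without_numbers none

def all_check_login (login : String) : String × String × String :=
  let bootstrap_class_green : PySem.Dict String String :=
    PySem.Dict.mk [("input_class", "is-valid"), ("div_class", "valid-feedback")]
  let bootstrap_class_red : PySem.Dict String String :=
    PySem.Dict.mk [("input_class", "is-invalid"), ("div_class", "invalid-feedback")]
  let message := check_login_len login                                -- while message == None: … break
  let message := if message = none then check_login_latin login else message
  match message with
  | none => (bootstrap_class_green.getD "input_class" "",
             bootstrap_class_green.getD "div_class" "",
             "Логин удовлетворяет всем требованиям")
  | some msg =>
      if msg = "" then ("", "", msg)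
      else (bootstrap_class_red.getD "input_class" "",
            bootstrap_class_red.getD "div_class" "", msg)

-- ===== PORT B =====
def all_check_login_alt (login : String) : String × String × String :=
  if PySem.Str.len login < 5 then
    ("is-invalid", "invalid-feedback", "Логин должен иметь длину не менее 5 символов")
  else if login.toList.any (fun symb =>
        !PySem.Chars.isdigit symb && symb ≠ ' ' &&
        !(("abcdefghijklmnopqrstuvwxyz".toList).contains (PySem.Chars.lowerChar symb))) then
    ("is-invalid", "invalid-feedback", "Логин должен состоять только из латинских букв и цифр")
  else
    ("is-valid", "valid-feedback", "Логин удовлетворяет всем требованиям")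

-- ===== PRECONDITION & SPEC =====
def Spec_all_check_login (login : String) (out : String × String × String) : Prop := out = all_check_login_alt login
instance (login : String) (out : String × String × String) : Decidable (Spec_all_check_login login out) := by unfold Spec_all_check_login; infer_instance

-- ===== CLAIM (what is proved, stated in full; the proofs are below) =====
def Claim_equal_all_check_login : Prop := ∀ (login : String), Dom_all_check_login login → Spec_all_check_login login (all_check_login login)

-- ===== LEMMAS AND PROOFS =====
theorem foldl_filtermap (cs : List Char) (acc : List Char) :
    cs.foldl
      (fun acc symb =>
        if (PySem.Chars.isdigit symb = false) ∧ (symb ≠ ' ') then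
          acc ++ [PySem.Chars.lowerChar symb]
        else acc) acc
    = acc ++ (cs.filter (fun c => !PySem.Chars.isdigit c && c ≠ ' ')).map PySem.Chars.lowerChar := by
  induction cs generalizing acc with
  | nil => simp
  | cons c rest ih =>
      simp only [List.foldl_cons, List.filter_cons]
      by_cases h1 : PySem.Chars.isdigit c = false
      · by_cases h2 : c = ' ' <;> simp [h1, h2, ih]
      · simp at h1; simp [h1, ih]

theorem latinScanA_eq (xs : List Char) :
    latinScanA xs none =
      if xs.any (fun c => !(("abcdefghijklmnopqrstuvwxyz".toList).contains c)) then
        some "Логин должен состоять только из латинских букв и цифр"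
      else none := by
  induction xs with
  | nil => rfl
  | cons c rest ih =>
      rw [List.any_cons]
      cases hc : ("abcdefghijklmnopqrstuvwxyz".toList).contains c with
      | true =>
          have e1 : latinScanA (c :: rest) none = latinScanA rest none := by
            rw [latinScanA, if_neg (by rw [hc]; simp)]
          rw [e1, ih]; simp
      | false =>
          have e1 : latinScanA (c :: rest) none
              = some "Логин должен состоять только из латинских букв и цифр" := by
            rw [latinScanA, if_pos (by rw [hc]; simp)]
          rw [e1]; simp

theorem all_check_login_spec' (login : String) :
    all_check_login login = all_check_login_alt login := by
  unfold all_check_login all_check_login_alt check_login_len check_login_latin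
  rw [foldl_filtermap, latinScanA_eq]
  by_cases hlen : PySem.Str.len login < 5
  · rw [if_pos hlen, if_pos hlen]
    rfl
  · rw [if_neg hlen, if_neg hlen]
    simp only [List.nil_append, List.any_map, List.any_filter, Function.comp,
      Bool.and_assoc, ne_eq, decide_not]
    cases h : login.toList.any (fun symb =>
        !PySem.Chars.isdigit symb && !decide (symb = ' ') &&
        !(("abcdefghijklmnopqrstuvwxyz".toList).contains (PySem.Chars.lowerChar symb))) with
    | true =>
        rw [show (login.toList.any fun a =>
            !PySem.Chars.isdigit a && (!decide (a = ' ') &&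
              !List.contains "abcdefghijklmnopqrstuvwxyz".toList (PySem.Chars.lowerChar a)))
            = true from by rw [← h]; simp only [Bool.and_assoc]]
        rfl
    | false =>
        rw [show (login.toList.any fun a =>
            !PySem.Chars.isdigit a && (!decide (a = ' ') &&
              !List.contains "abcdefghijklmnopqrstuvwxyz".toList (PySem.Chars.lowerChar a)))
            = false from by rw [← h]; simp only [Bool.and_assoc]]
        rfl

-- ===== VERDICT (by name: the statement is the Claim_ definition above) =====
theorem all_check_login_spec : Claim_equal_all_check_login := by
  intro login _
  unfold Spec_all_check_login
  exact all_check_login_spec' login
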